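-- pv_equiv track=rewrite | github.com/Vignesh010101/Leetcode-Solutions-With-Python-Part-2 | 2488-divide-intervals-into-minimum-number-of-groups/divide-intervals-into-minimum-number-of-groups.py | minGroups
-- ===== SOURCE A (Python) =====
-- from typing import List
--
-- def minGroups(I: List[List[int]]) -> int:
--     N = len(I)
--     S, E = [], []
--     for s, e in I:
--         S.append(s)
--         E.append(e)
--     S.sort()
--     E.sort()
--
--     eIdx = 0
--     res = 0
--     for sIdx in range(N):
--         if S[sIdx] > E[eIdx]:
--             eIdx += 1
--         else:
--             res += 1
--     return res
-- ===== SOURCE B (Python) =====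
-- from typing import List
--
-- def minGroups(I: List[List[int]]) -> int:
--     # Max concurrency: the minimum number of groups equals the largest number
--     # of intervals simultaneously open at some interval's start point.
--     res = 0
--     for iv in I:
--         s = iv[0]
--         cur = sum(1 for r in I if r[0] <= s) - sum(1 for r in I if r[1] < s)
--         if res < cur:
--             res = cur
--     return res
-- ===== Notes on version B (the rewrite author's own statement) =====
-- stated objective: alternative
-- what changed: Replaces sorting the start and end lists plus a two-pointer sweep by a direct max-concurrency count: for each interval's start s it counts starts <= s minus ends < s and takes the maximum, with no sorting and no pointer state.
import Mathlib
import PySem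

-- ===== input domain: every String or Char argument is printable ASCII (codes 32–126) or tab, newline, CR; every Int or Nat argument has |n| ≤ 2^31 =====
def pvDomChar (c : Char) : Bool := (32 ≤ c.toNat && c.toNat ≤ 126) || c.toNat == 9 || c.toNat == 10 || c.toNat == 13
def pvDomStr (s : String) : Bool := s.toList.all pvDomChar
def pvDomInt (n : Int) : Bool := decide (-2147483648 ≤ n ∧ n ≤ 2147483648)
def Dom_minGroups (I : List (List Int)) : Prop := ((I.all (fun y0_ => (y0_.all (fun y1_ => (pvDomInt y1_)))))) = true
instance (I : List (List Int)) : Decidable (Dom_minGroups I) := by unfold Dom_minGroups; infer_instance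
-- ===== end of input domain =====

-- B replaces A's sort + two-pointer sweep by a direct max-concurrency count at start points
-- (alternative algorithm, same results; not claimed faster).

-- ===== PORT A =====
def minGroups (I : List (List Int)) : Int :=
  let N : Int := I.length
  -- `for s, e in I: S.append(s); E.append(e)`; under Pre_ every row has length 2,
  -- so indices 0 and 1 are in range and the getD defaults are never used
  let SE : List Int × List Int := I.foldl
    (fun (p : List Int × List Int) r =>
      (p.1 ++ [PySem.List.pyGetD r 0 0], p.2 ++ [PySem.List.pyGetD r 1 0])) ([], [])
  let S := PySem.List.sorted SE.1 (fun x => x) false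
  let E := PySem.List.sorted SE.2 (fun x => x) false
  -- `for sIdx in range(N)` with state (eIdx, res); sIdx < N and eIdx ≤ sIdx keep indices in range
  let st := (PySem.List.pyRange 0 N 1).foldl
    (fun (st : Int × Int) sIdx =>
      if PySem.List.pyGetD E st.1 0 < PySem.List.pyGetD S sIdx 0
      then (st.1 + 1, st.2)
      else (st.1, st.2 + 1)) (0, 0)
  st.2

-- ===== PORT B =====
def minGroups_alt (I : List (List Int)) : Int :=
  I.foldl
    (fun res iv =>
      let s := PySem.List.pyGetD iv 0 0
      let cur : Int := ((I.filter (fun r => decide (PySem.List.pyGetD r 0 0 ≤ s))).length : Int)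
                     - ((I.filter (fun r => decide (PySem.List.pyGetD r 1 0 < s))).length : Int)
      if res < cur then cur else res) 0

-- ===== PRECONDITION & SPEC =====
-- Pre_ excludes exactly the inputs on which Python A raises: a row that is not a pair
-- makes `for s, e in I` raise ValueError.
def Pre_minGroups (I : List (List Int)) : Prop := ∀ r ∈ I, r.length = 2
instance (I : List (List Int)) : Decidable (Pre_minGroups I) := by unfold Pre_minGroups; infer_instance
def pvWitness_minGroups : List (List Int) := [[1, 3], [2, 4]]

def Spec_minGroups (I : List (List Int)) (out : Int) : Prop := out = minGroups_alt I
instance (I : List (List Int)) (out : Int) : Decidable (Spec_minGroups I out) := by unfold Spec_minGroups; infer_instance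

-- ===== CLAIM (what is proved, stated in full; the proofs are below) =====
def Claim_equal_minGroups : Prop := ∀ (I : List (List Int)), Dom_minGroups I → Pre_minGroups I → Spec_minGroups I (minGroups I)

-- ===== LEMMAS AND PROOFS =====

-- row projections
def pvH0 (r : List Int) : Int := PySem.List.pyGetD r 0 0
def pvH1 (r : List Int) : Int := PySem.List.pyGetD r 1 0

-- counts
def pvCntLe (S : List Int) (t : Int) : Int := ((S.filter (fun x => decide (x ≤ t))).length : Int)
def pvCntLt (E : List Int) (t : Int) : Int := ((E.filter (fun x => decide (x < t))).length : Int)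

-- A's two-pointer loop as structural recursion on the two sorted lists
def pvG : List Int → List Int → Int
  | [], _ => 0
  | _ :: S, [] => 1 + pvG S []
  | s :: S, e :: E => if e < s then pvG S E else 1 + pvG S (e :: E)

-- fold of max
def pvFm (f : Int → Int) (T : List Int) (c : Int) : Int := T.foldl (fun r t => max r (f t)) c

def pvM (S E : List Int) : Int := pvFm (fun t => pvCntLe S t - pvCntLt E t) S 0

theorem pvFm_cons (f : Int → Int) (a : Int) (T : List Int) (c : Int) :
    pvFm f (a :: T) c = pvFm f T (max c (f a)) := rfl

theorem pvFm_max (f : Int → Int) (T : List Int) (c d : Int) :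
    pvFm f T (max c d) = max (pvFm f T c) d := by
  induction T generalizing c with
  | nil => rfl
  | cons a T ih =>
    rw [pvFm_cons, pvFm_cons]
    have h : max (max c d) (f a) = max (max c (f a)) d := by
      rw [max_assoc, max_comm d (f a), ← max_assoc]
    rw [h, ih]

theorem pvFm_ge_init (f : Int → Int) (T : List Int) (c : Int) : c ≤ pvFm f T c := by
  induction T generalizing c with
  | nil => exact le_rfl
  | cons a T ih => exact le_trans (le_max_left c (f a)) (ih (max c (f a)))

theorem pvFm_ge_mem (f : Int → Int) (T : List Int) (c a : Int) (h : a ∈ T) :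
    f a ≤ pvFm f T c := by
  induction T generalizing c with
  | nil => cases h
  | cons b T ih =>
    rw [pvFm_cons]
    rcases List.mem_cons.mp h with h | h
    · subst h; exact le_trans (le_max_right c (f a)) (pvFm_ge_init f T _)
    · exact ih _ h

theorem pvFm_congr_mem (f g : Int → Int) (T : List Int) (c : Int)
    (h : ∀ t ∈ T, f t = g t) : pvFm f T c = pvFm g T c := by
  induction T generalizing c with
  | nil => rfl
  | cons a T ih =>
    rw [pvFm_cons, pvFm_cons, h a List.mem_cons_self]
    exact ih _ (fun t ht => h t (List.mem_cons_of_mem a ht))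

theorem pvFm_shift (f : Int → Int) (k : Int) (T : List Int) (c : Int) :
    pvFm (fun t => k + f t) T (k + c) = k + pvFm f T c := by
  induction T generalizing c with
  | nil => rfl
  | cons a T ih =>
    rw [pvFm_cons, pvFm_cons]
    have h : max (k + c) (k + f a) = k + max c (f a) := by
      rcases le_total c (f a) with h | h <;> simp [max_def] <;> omega
    rw [h, ih]

theorem pvFm_perm (f : Int → Int) (T T' : List Int) (h : T.Perm T') (c : Int) :
    pvFm f T c = pvFm f T' c := by
  induction h generalizing c with
  | nil => rfl
  | cons a _ ih => rw [pvFm_cons, pvFm_cons, ih]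
  | swap a b T =>
    rw [pvFm_cons, pvFm_cons, pvFm_cons, pvFm_cons]
    have h : max (max c (f b)) (f a) = max (max c (f a)) (f b) := by
      rw [max_assoc, max_comm (f b) (f a), ← max_assoc]
    rw [h]
  | trans _ _ ih1 ih2 => rw [ih1, ih2]

-- if the start is above 0 and witnessed in T, it can replace the 0 seed
theorem pvFm_seed (f : Int → Int) (T : List Int) (d : Int) (h0 : 0 ≤ d)
    (hw : d = 0 ∨ ∃ t ∈ T, d ≤ f t) : pvFm f T d = pvFm f T 0 := by
  rcases hw with h | ⟨t, ht, hd⟩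
  · rw [h]
  · have h1 : d = max 0 d := by omega
    rw [h1, pvFm_max]
    have h2 : d ≤ pvFm f T 0 := le_trans hd (pvFm_ge_mem f T 0 t ht)
    omega

theorem pvCntLe_nonneg (S : List Int) (t : Int) : 0 ≤ pvCntLe S t := Int.natCast_nonneg _
theorem pvCntLt_nonneg (E : List Int) (t : Int) : 0 ≤ pvCntLt E t := Int.natCast_nonneg _

theorem pvCntLe_cons (s t : Int) (S : List Int) :
    pvCntLe (s :: S) t = (if s ≤ t then 1 + pvCntLe S t else pvCntLe S t) := by
  unfold pvCntLe
  by_cases h : s ≤ t <;> simp [h] <;> omega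

theorem pvCntLt_cons (e t : Int) (E : List Int) :
    pvCntLt (e :: E) t = (if e < t then 1 + pvCntLt E t else pvCntLt E t) := by
  unfold pvCntLt
  by_cases h : e < t <;> simp [h] <;> omega

theorem pvCntLt_eq_zero (E : List Int) (t : Int) (h : ∀ x ∈ E, t ≤ x) :
    pvCntLt E t = 0 := by
  unfold pvCntLt
  have : E.filter (fun x => decide (x < t)) = [] := by
    apply List.filter_eq_nil_iff.mpr
    intro x hx
    simp only [decide_eq_true_eq, not_lt]
    exact h x hx
  rw [this]; rfl

theorem pvCntLe_pos_mem (S : List Int) (s : Int) (hs : ∀ t ∈ S, s ≤ t)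
    (h : 0 < pvCntLe S s) : s ∈ S := by
  unfold pvCntLe at h
  have hne : S.filter (fun x => decide (x ≤ s)) ≠ [] := by
    intro hnil; rw [hnil] at h; simp at h
  rcases List.exists_mem_of_ne_nil _ hne with ⟨t, ht⟩
  have ht1 := List.mem_of_mem_filter ht
  have ht2 : t ≤ s := by simpa using List.of_mem_filter ht
  have : t = s := le_antisymm ht2 (hs t ht1)
  exact this ▸ ht1

theorem pvCntLe_perm (S S' : List Int) (h : S.Perm S') (t : Int) :
    pvCntLe S t = pvCntLe S' t := by
  unfold pvCntLe
  rw [(h.filter _).length_eq]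

theorem pvCntLt_perm (E E' : List Int) (h : E.Perm E') (t : Int) :
    pvCntLt E t = pvCntLt E' t := by
  unfold pvCntLt
  rw [(h.filter _).length_eq]

-- MAIN: on sorted lists the two-pointer count is the max concurrency at start points
theorem pvG_pop (s e : Int) (S E : List Int) (h : e < s) :
    pvG (s :: S) (e :: E) = pvG S E := by
  simp [pvG, h]

theorem pvG_keep (s e : Int) (S E : List Int) (h : ¬ e < s) :
    pvG (s :: S) (e :: E) = 1 + pvG S (e :: E) := by
  simp [pvG, h]

theorem pvG_eq_M (S E : List Int) (hS : S.Pairwise (· ≤ ·)) (hE : E.Pairwise (· ≤ ·)) :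
    pvG S E = pvM S E := by
  induction S generalizing E with
  | nil => cases E <;> rfl
  | cons s S ih =>
    have hsS : ∀ t ∈ S, s ≤ t := (List.pairwise_cons.mp hS).1
    have hS' : S.Pairwise (· ≤ ·) := (List.pairwise_cons.mp hS).2
    have hmem : ∀ t ∈ s :: S, s ≤ t := by
      intro t ht
      rcases List.mem_cons.mp ht with h | h
      · omega
      · exact hsS t h
    cases E with
    | nil =>
      show (1 + pvG S []) = pvM (s :: S) []
      have hcongr : ∀ t ∈ s :: S, pvCntLe (s :: S) t - pvCntLt [] t
          = 1 + (pvCntLe S t - pvCntLt [] t) := by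
        intro t ht
        rw [pvCntLe_cons]
        simp [hmem t ht]
        omega
      unfold pvM
      rw [pvFm_congr_mem _ _ _ _ hcongr]
      have h0 : (0 : Int) = 1 + (-1) := by omega
      rw [h0, pvFm_shift, pvFm_cons]
      have hs0 : pvCntLt [] s = 0 := pvCntLt_eq_zero [] s (by intro x hx; cases hx)
      have hge : (0:Int) ≤ pvCntLe S s - pvCntLt [] s := by
        rw [hs0]; have := pvCntLe_nonneg S s; omega
      have hmax : max (-1) (pvCntLe S s - pvCntLt [] s) = pvCntLe S s - pvCntLt [] s := by omega
      have hor : pvCntLe S s - pvCntLt [] s = 0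
          ∨ ∃ t ∈ S, pvCntLe S s - pvCntLt [] s ≤ pvCntLe S t - pvCntLt [] t := by
        by_cases hz : pvCntLe S s = 0
        · left; rw [hs0]; omega
        · right
          exact ⟨s, pvCntLe_pos_mem S s hsS (by have := pvCntLe_nonneg S s; omega), le_refl _⟩
      rw [hmax, pvFm_seed _ _ _ hge hor, ih [] hS' (by simp)]
      norm_num [pvM]
    | cons e E' =>
      have heE : ∀ x ∈ E', e ≤ x := (List.pairwise_cons.mp hE).1
      have hE' : E'.Pairwise (· ≤ ·) := (List.pairwise_cons.mp hE).2
      by_cases hpop : e < s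
      · -- pop branch
        rw [pvG_pop s e S E' hpop, ih E' hS' hE']
        have hcongr : ∀ t ∈ s :: S, pvCntLe (s :: S) t - pvCntLt (e :: E') t
            = pvCntLe S t - pvCntLt E' t := by
          intro t ht
          rw [pvCntLe_cons, pvCntLt_cons]
          have h1 : s ≤ t := hmem t ht
          have h2 : e < t := by omega
          simp [h1, h2]
        unfold pvM
        rw [pvFm_congr_mem _ _ (s :: S) 0 hcongr, pvFm_cons]
        have hge : (0:Int) ≤ max 0 (pvCntLe S s - pvCntLt E' s) := le_max_left _ _
        have hor : max 0 (pvCntLe S s - pvCntLt E' s) = 0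
            ∨ ∃ t ∈ S, max 0 (pvCntLe S s - pvCntLt E' s) ≤ pvCntLe S t - pvCntLt E' t := by
          by_cases hle : pvCntLe S s - pvCntLt E' s ≤ 0
          · left; omega
          · right
            refine ⟨s, pvCntLe_pos_mem S s hsS ?_, by omega⟩
            have := pvCntLt_nonneg E' s
            omega
        rw [pvFm_seed _ _ _ hge hor]
      · -- keep branch
        have hse : s ≤ e := by omega
        rw [pvG_keep s e S E' hpop, ih (e :: E') hS' hE]
        have hcongr : ∀ t ∈ s :: S, pvCntLe (s :: S) t - pvCntLt (e :: E') t
            = 1 + (pvCntLe S t - pvCntLt (e :: E') t) := by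
          intro t ht
          rw [pvCntLe_cons]
          simp [hmem t ht]
          omega
        unfold pvM
        rw [pvFm_congr_mem _ _ _ _ hcongr]
        have h0 : (0 : Int) = 1 + (-1) := by omega
        rw [h0, pvFm_shift, pvFm_cons]
        have hs0 : pvCntLt (e :: E') s = 0 := by
          apply pvCntLt_eq_zero
          intro x hx
          rcases List.mem_cons.mp hx with h | h
          · omega
          · have := heE x h; omega
        have hge : (0:Int) ≤ pvCntLe S s - pvCntLt (e :: E') s := by
          rw [hs0]; have := pvCntLe_nonneg S s; omega
        have hmax : max (-1) (pvCntLe S s - pvCntLt (e :: E') s)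
            = pvCntLe S s - pvCntLt (e :: E') s := by omega
        have hor : pvCntLe S s - pvCntLt (e :: E') s = 0
            ∨ ∃ t ∈ S, pvCntLe S s - pvCntLt (e :: E') s ≤ pvCntLe S t - pvCntLt (e :: E') t := by
          by_cases hz : pvCntLe S s = 0
          · left; rw [hs0]; omega
          · right
            exact ⟨s, pvCntLe_pos_mem S s hsS (by have := pvCntLe_nonneg S s; omega), le_refl _⟩
        rw [hmax, pvFm_seed _ _ _ hge hor]
        norm_num

-- A's extraction loop builds the two projection lists
theorem pvExtract (I : List (List Int)) (a b : List Int) :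
    I.foldl (fun (p : List Int × List Int) r =>
      (p.1 ++ [PySem.List.pyGetD r 0 0], p.2 ++ [PySem.List.pyGetD r 1 0])) (a, b)
    = (a ++ I.map pvH0, b ++ I.map pvH1) := by
  induction I generalizing a b with
  | nil => simp
  | cons r I ih => simp [List.foldl_cons, ih, pvH0, pvH1]

-- A's range fold is pvG on the remaining suffixes
theorem pvRangeFold (S E : List Int) (hlen : S.length = E.length) :
    ∀ (d k e : Nat) (r : Int), S.length - k ≤ d → e ≤ k →
    (((PySem.List.pyRange k (S.length : Int) 1).foldl
      (fun (st : Int × Int) sIdx =>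
        if PySem.List.pyGetD E st.1 0 < PySem.List.pyGetD S sIdx 0
        then (st.1 + 1, st.2)
        else (st.1, st.2 + 1)) ((e : Int), r)).2)
    = r + pvG (S.drop k) (E.drop e) := by
  intro d
  induction d with
  | zero =>
    intro k e r hd he
    have hk : S.length ≤ k := by omega
    rw [PySem.List.pyRange_one_eq_nil (by exact_mod_cast hk)]
    rw [List.drop_eq_nil_of_le hk]
    simp [pvG]
  | succ d ih =>
    intro k e r hd he
    by_cases hk : S.length ≤ k
    · rw [PySem.List.pyRange_one_eq_nil (by exact_mod_cast hk)]
      rw [List.drop_eq_nil_of_le hk]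
      simp [pvG]
    · rw [not_le] at hk
      have hkE : k < E.length := by omega
      have heE : e < E.length := by omega
      rw [PySem.List.pyRange_one_cons (by exact_mod_cast hk)]
      rw [List.foldl_cons]
      have hgS : PySem.List.pyGetD S (k : Int) 0 = S[k] := by
        rw [PySem.List.pyGetD_natCast, List.getD_eq_getElem?_getD, List.getElem?_eq_getElem hk]
        rfl
      have hgE : PySem.List.pyGetD E (e : Int) 0 = E[e] := by
        rw [PySem.List.pyGetD_natCast, List.getD_eq_getElem?_getD, List.getElem?_eq_getElem heE]
        rfl
      have hdropS : S.drop k = S[k] :: S.drop (k + 1) := List.drop_eq_getElem_cons hk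
      have hdropE : E.drop e = E[e] :: E.drop (e + 1) := List.drop_eq_getElem_cons heE
      simp only [hgS, hgE]
      by_cases hcmp : E[e] < S[k]
      · simp only [hcmp, if_true]
        have hcast : ((e : Int) + 1) = ((e + 1 : Nat) : Int) := by push_cast; ring
        have hnext : ((k : Int) + 1) = ((k + 1 : Nat) : Int) := by push_cast; ring
        rw [hcast, hnext, ih (k+1) (e+1) r (by omega) (by omega)]
        rw [hdropS, hdropE, pvG_pop _ _ _ _ hcmp]
      · simp only [hcmp, if_false]
        have hnext : ((k : Int) + 1) = ((k + 1 : Nat) : Int) := by push_cast; ring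
        rw [hnext, ih (k+1) e (r+1) (by omega) (by omega)]
        rw [hdropS, hdropE, pvG_keep _ _ _ _ hcmp, ← hdropE]
        omega

-- the range fold from index 0 with both pointers at 0
theorem pvLoop (S E : List Int) (hlen : S.length = E.length) :
    (((PySem.List.pyRange 0 (S.length : Int) 1).foldl
      (fun (st : Int × Int) sIdx =>
        if PySem.List.pyGetD E st.1 0 < PySem.List.pyGetD S sIdx 0
        then (st.1 + 1, st.2)
        else (st.1, st.2 + 1)) (0, 0)).2) = pvG S E := by
  have h := pvRangeFold S E hlen S.length 0 0 0 (by omega) (by omega)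
  simp only [Nat.cast_zero, List.drop_zero, zero_add] at h
  exact h

-- port A computes pvG of the two sorted projection lists
theorem pvA_eq (I : List (List Int)) :
    minGroups I = pvG (PySem.List.sorted (I.map pvH0) (fun x => x) false)
                      (PySem.List.sorted (I.map pvH1) (fun x => x) false) := by
  simp only [minGroups]
  rw [pvExtract]
  simp only [List.nil_append]
  have hlS : (PySem.List.sorted (I.map pvH0) (fun x => x) false).length = I.length := by
    rw [PySem.List.length_sorted, List.length_map]
  have hlE : (PySem.List.sorted (I.map pvH1) (fun x => x) false).length = I.length := by
    rw [PySem.List.length_sorted, List.length_map]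
  have hIN : ((I.length : Nat) : Int)
      = ((PySem.List.sorted (I.map pvH0) (fun x => x) false).length : Int) := by
    exact_mod_cast hlS.symm
  rw [hIN]
  exact pvLoop _ _ (by omega)

-- port B is the max-fold of the concurrency function over the start projections
theorem pvB_eq (I : List (List Int)) :
    minGroups_alt I
    = pvFm (fun t => pvCntLe (I.map pvH0) t - pvCntLt (I.map pvH1) t) (I.map pvH0) 0 := by
  simp only [minGroups_alt, pvFm]
  rw [List.foldl_map]
  congr 1
  funext res iv
  have h1 : ((I.filter (fun r => decide (PySem.List.pyGetD r 0 0 ≤ PySem.List.pyGetD iv 0 0))).length : Int)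
      = pvCntLe (I.map pvH0) (pvH0 iv) := by
    unfold pvCntLe pvH0
    rw [List.filter_map, List.length_map]
    rfl
  have h2 : ((I.filter (fun r => decide (PySem.List.pyGetD r 1 0 < PySem.List.pyGetD iv 0 0))).length : Int)
      = pvCntLt (I.map pvH1) (pvH0 iv) := by
    unfold pvCntLt pvH1 pvH0
    rw [List.filter_map, List.length_map]
    rfl
  rw [h1, h2, max_def]
  split_ifs <;> omega

-- ===== VERDICT (by name: the statement is the Claim_ definition above) =====
theorem minGroups_spec : Claim_equal_minGroups := by
  intro I _ _
  unfold Spec_minGroups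
  rw [pvA_eq, pvB_eq]
  set S0 := I.map pvH0
  set E0 := I.map pvH1
  set S := PySem.List.sorted S0 (fun x => x) false with hS
  set E := PySem.List.sorted E0 (fun x => x) false with hE
  have hpS : S.Pairwise (· ≤ ·) := by
    simpa [hS] using PySem.List.sorted_pairwise S0 (fun x => x)
  have hpE : E.Pairwise (· ≤ ·) := by
    simpa [hE] using PySem.List.sorted_pairwise E0 (fun x => x)
  rw [pvG_eq_M S E hpS hpE]
  unfold pvM
  have hpermS : S.Perm S0 := PySem.List.sorted_perm S0 (fun x => x) false
  have hpermE : E.Perm E0 := PySem.List.sorted_perm E0 (fun x => x) false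
  have hcongr : ∀ t ∈ S, pvCntLe S t - pvCntLt E t = pvCntLe S0 t - pvCntLt E0 t := by
    intro t _
    rw [pvCntLe_perm S S0 hpermS, pvCntLt_perm E E0 hpermE]
  rw [pvFm_congr_mem _ _ _ _ hcongr]
  exact pvFm_perm _ S S0 hpermS 0
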